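-- pv_equiv track=rewrite | github.com/mackaronina/render-nekoslaviabot | functions.py | equ
-- ===== SOURCE A (Python) =====
-- def equ(row):
-- 	if -1 in row:
-- 		return -1
-- 	if 5 not in row:
-- 		if row.count(row[0]) == len(row):
-- 			return row[0]
-- 		else:
-- 			return -1
-- 	for i in range(5):
-- 		rw = row.copy()
-- 		for j in range(len(rw)):
-- 			if rw[j] == 5:
-- 				rw[j] = i
-- 		if rw.count(rw[0]) == len(rw):
-- 			return rw[0]
-- 	return -1
-- ===== SOURCE B (Python) =====
-- def equ(row):
--     if -1 in row:
--         return -1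
--     if 5 not in row:
--         return row[0] if all(x == row[0] for x in row) else -1
--     vals = {x for x in row if x != 5}
--     if not vals:
--         return 0
--     if len(vals) > 1:
--         return -1
--     v = vals.pop()
--     if 0 <= v <= 4:
--         return row[0] if row[0] != 5 else v
--     return -1
-- ===== Notes on version B (the rewrite author's own statement) =====
-- stated objective: simpler
-- what changed: A tries each i in range(5), copies the row, substitutes 5->i and recounts; B makes one pass collecting the set of distinct non-5 values and decides directly from its size (0 -> 0, >1 -> -1, exactly one v -> row[0] or v if v is in 0..4, else -1).
import Mathlib
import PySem

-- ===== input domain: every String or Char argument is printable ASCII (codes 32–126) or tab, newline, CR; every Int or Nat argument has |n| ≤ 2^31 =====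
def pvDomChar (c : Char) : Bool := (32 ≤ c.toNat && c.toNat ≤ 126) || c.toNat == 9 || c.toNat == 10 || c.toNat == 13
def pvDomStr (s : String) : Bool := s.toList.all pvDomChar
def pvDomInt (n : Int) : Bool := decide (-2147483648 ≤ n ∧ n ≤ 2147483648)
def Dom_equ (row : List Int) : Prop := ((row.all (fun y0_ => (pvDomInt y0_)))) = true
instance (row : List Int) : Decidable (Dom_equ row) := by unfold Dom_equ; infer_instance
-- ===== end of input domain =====

-- B replaces A's five substitute-and-recount passes by one pass collecting the set of distinct non-5 values (objective: simpler).

-- ===== PORT A =====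
-- the 'for i in range(5)' loop with early return; rw is the row with every 5 replaced by i
def equTryLoop (row : List Int) : List Int → Int
  | [] => -1
  | i :: rest =>
    let rw := row.map (fun x => if x = 5 then i else x)
    if PySem.List.count rw (PySem.List.pyGetD rw 0 0) = rw.length then PySem.List.pyGetD rw 0 0
    else equTryLoop row rest

def equ (row : List Int) : Int :=
  if (-1 : Int) ∈ row then -1
  else if (5 : Int) ∉ row then
    (if PySem.List.count row (PySem.List.pyGetD row 0 0) = row.length then PySem.List.pyGetD row 0 0 else -1)
  else equTryLoop row (PySem.List.pyRange 0 5 1)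

-- ===== PORT B =====
def equ_alt (row : List Int) : Int :=
  if (-1 : Int) ∈ row then -1
  else if (5 : Int) ∉ row then
    (if row.all (fun x => x == PySem.List.pyGetD row 0 0) then PySem.List.pyGetD row 0 0 else -1)
  else
    let vals : PySem.Set Int := PySem.Set.ofList (row.filter (fun x => x != 5))
    if vals.isEmpty then 0
    else if 1 < vals.length then -1
    else
      let v := vals.headI
      if 0 ≤ v ∧ v ≤ 4 then (if PySem.List.pyGetD row 0 0 ≠ 5 then PySem.List.pyGetD row 0 0 else v) else -1

-- ===== PRECONDITION & SPEC =====
-- Pre_ excludes only the empty row, on which A raises IndexError (row[0]).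
def Pre_equ (row : List Int) : Prop := row ≠ []
instance (row : List Int) : Decidable (Pre_equ row) := by unfold Pre_equ; infer_instance
def pvWitness_equ : List Int := ([5, 3, 5])

def Spec_equ (row : List Int) (out : Int) : Prop := out = equ_alt row
instance (row : List Int) (out : Int) : Decidable (Spec_equ row out) := by unfold Spec_equ; infer_instance

-- ===== CLAIM (what is proved, stated in full; the proofs are below) =====
def Claim_equal_equ : Prop := ∀ (row : List Int), Dom_equ row → Pre_equ row → Spec_equ row (equ row)

-- ===== LEMMAS AND PROOFS =====

-- A's per-iteration success test, characterised: all elements equal after substituting i for every 5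
lemma equ_cond_char (x : Int) (xs : List Int) (i : Int) (h5 : (5 : Int) ∈ x :: xs) :
    (PySem.List.count ((x :: xs).map (fun y => if y = 5 then i else y))
       (PySem.List.pyGetD ((x :: xs).map (fun y => if y = 5 then i else y)) 0 0)
       = ((x :: xs).map (fun y => if y = 5 then i else y)).length)
    ↔ (∀ y ∈ x :: xs, y = 5 ∨ y = i) := by
  set g : Int → Int := fun y => if y = 5 then i else y with hg
  have hget : PySem.List.pyGetD ((x :: xs).map g) 0 0 = g x := by
    simp [PySem.List.pyGetD, PySem.List.pyGet?, PySem.List.pyIdx?]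
  rw [hget]
  have hcnt : PySem.List.count ((x :: xs).map g) (g x) = List.count (g x) ((x :: xs).map g) := by
    simp [PySem.List.count_eq]
  rw [hcnt, List.count_eq_length]
  constructor
  · intro h y hy
    have hg5 : g 5 = i := by simp [hg]
    have hgx : g x = i := by
      have h5' := h (g 5) (List.mem_map_of_mem h5)
      rw [hg5] at h5'; exact h5'
    have hy' : g x = g y := h (g y) (List.mem_map_of_mem hy)
    by_cases h5y : y = 5
    · exact Or.inl h5y
    · right
      have hyv : g y = y := by simp [hg, h5y]
      rw [hyv] at hy'
      rw [← hy', hgx]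
  · intro h b hb
    have hval : ∀ y ∈ x :: xs, g y = i := by
      intro y hy
      rcases h y hy with h1 | h1
      · simp [hg, h1]
      · by_cases h5y : y = 5 <;> simp [hg, h5y, h1]
    rcases List.mem_map.mp hb with ⟨y, hy, rfl⟩
    rw [hval y hy, hval x (List.mem_cons_self)]

-- A's loop when the success test holds for exactly one value f
lemma equ_loop_char (x : Int) (xs : List Int) (f : Int) (h5 : (5 : Int) ∈ x :: xs)
    (hiff : ∀ i, (∀ y ∈ x :: xs, y = 5 ∨ y = i) ↔ i = f) :
    ∀ l : List Int, equTryLoop (x :: xs) l = if f ∈ l then (if x = 5 then f else x) else -1 := by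
  intro l
  induction l with
  | nil => simp [equTryLoop]
  | cons i rest ih =>
    rw [equTryLoop]
    by_cases hc : (∀ y ∈ x :: xs, y = 5 ∨ y = i)
    · have hif : i = f := (hiff i).mp hc
      rw [if_pos ((equ_cond_char x xs i h5).mpr hc)]
      have hget : PySem.List.pyGetD ((x :: xs).map (fun y => if y = 5 then i else y)) 0 0
          = if x = 5 then i else x := by
        simp [PySem.List.pyGetD, PySem.List.pyGet?, PySem.List.pyIdx?]
      rw [hget, hif]
      simp
    · rw [if_neg (fun h => hc ((equ_cond_char x xs i h5).mp h))]
      have hne : f ≠ i := fun h => hc ((hiff i).mpr h.symm)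
      rw [ih]
      simp [hne]

-- A's loop when the success test holds for no value
lemma equ_loop_none (x : Int) (xs : List Int) (h5 : (5 : Int) ∈ x :: xs)
    (hno : ∀ i, ¬ (∀ y ∈ x :: xs, y = 5 ∨ y = i)) :
    ∀ l : List Int, equTryLoop (x :: xs) l = -1 := by
  intro l
  induction l with
  | nil => simp [equTryLoop]
  | cons i rest ih =>
    rw [equTryLoop, if_neg (fun h => hno i ((equ_cond_char x xs i h5).mp h)), ih]

-- ===== VERDICT (by name: the statement is the Claim_ definition above) =====
theorem equ_spec : Claim_equal_equ := by
  intro row _ hpre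
  unfold Spec_equ
  cases row with
  | nil => exact absurd rfl hpre
  | cons x xs =>
    have hget : PySem.List.pyGetD (x :: xs) 0 0 = x := by
      simp [PySem.List.pyGetD, PySem.List.pyGet?, PySem.List.pyIdx?]
    by_cases hm1 : (-1 : Int) ∈ x :: xs
    · simp [equ, equ_alt, hm1]
    · by_cases h5 : (5 : Int) ∈ x :: xs
      · -- wildcard branch
        rw [equ, equ_alt, if_neg hm1, if_neg hm1,
           if_neg (not_not_intro h5), if_neg (not_not_intro h5)]
        set F := (x :: xs).filter (fun y => y != 5) with hF
        have hFmem : ∀ y, y ∈ F ↔ (y ∈ x :: xs ∧ y ≠ 5) := by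
          intro y; simp [hF]
        by_cases hFe : F = []
        · -- all elements are 5
          have hall5 : ∀ y ∈ x :: xs, y = 5 := by
            intro y hy
            by_contra hne
            have hyF : y ∈ F := (hFmem y).mpr ⟨hy, hne⟩
            rw [hFe] at hyF
            exact absurd hyF (List.not_mem_nil)
          have hx5 : x = 5 := hall5 x List.mem_cons_self
          have hP0 : ∀ y ∈ x :: xs, y = 5 ∨ y = 0 := fun y hy => Or.inl (hall5 y hy)
          have hrw : PySem.List.pyRange 0 5 1 = 0 :: PySem.List.pyRange 1 5 1 :=
            PySem.List.pyRange_one_cons (by norm_num)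
          rw [hrw, equTryLoop, if_pos ((equ_cond_char x xs 0 h5).mpr hP0)]
          have hget0 : PySem.List.pyGetD ((x :: xs).map (fun y => if y = 5 then (0:Int) else y)) 0 0
              = if x = 5 then (0:Int) else x := by
            simp [PySem.List.pyGetD, PySem.List.pyGet?, PySem.List.pyIdx?]
          rw [hget0, if_pos hx5]
          simp [hFe, PySem.Set.ofList]
        · obtain ⟨f, fs, hFc⟩ := List.ne_nil_iff_exists_cons.mp hFe
          have hfF : f ∈ F := by rw [hFc]; exact List.mem_cons_self
          have hf5 : f ≠ 5 := ((hFmem f).mp hfF).2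
          have hfrow : f ∈ x :: xs := ((hFmem f).mp hfF).1
          by_cases huni : ∀ y ∈ F, y = f
          · -- exactly one non-5 value f
            have hVals : PySem.Set.ofList F = [f] := by
              have hnd : (PySem.Set.ofList F).Nodup := PySem.Set.nodup_ofList F
              have hmem : ∀ y, y ∈ PySem.Set.ofList F ↔ y = f := by
                intro y
                rw [PySem.Set.mem_ofList F y]
                exact ⟨fun h => huni y h, fun h => h ▸ hfF⟩
              cases hV : PySem.Set.ofList F with
              | nil => exact absurd ((hmem f).mpr rfl) (by simp [hV])
              | cons a t =>
                have ha : a = f := (hmem a).mp (hV ▸ List.mem_cons_self)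
                cases t with
                | nil => rw [ha]
                | cons b t' =>
                  have hb : b = f := (hmem b).mp (hV ▸ (by simp))
                  rw [hV] at hnd
                  exact absurd (ha.trans hb.symm) (by simp at hnd; tauto)
            have hiff : ∀ i, (∀ y ∈ x :: xs, y = 5 ∨ y = i) ↔ i = f := by
              intro i
              constructor
              · intro h
                rcases h f hfrow with h1 | h1
                · exact absurd h1 hf5
                · exact h1.symm
              · rintro rfl y hy
                by_cases hy5 : y = 5
                · exact Or.inl hy5
                · exact Or.inr (huni y ((hFmem y).mpr ⟨hy, hy5⟩))
            rw [equ_loop_char x xs f h5 hiff, hVals]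
            simp only [List.isEmpty_cons, Bool.false_eq_true, if_false,
              List.length_cons, List.length_nil, List.headI, hget,
              PySem.List.mem_pyRange_one]
            have h11 : ¬ (1 < 0 + 1) := by omega
            rw [if_neg h11]
            by_cases hfr : 0 ≤ f ∧ f ≤ 4
            · rw [if_pos ⟨hfr.1, by omega⟩, if_pos hfr]
              by_cases hx5 : x = 5
              · rw [if_pos hx5, if_neg (not_not_intro hx5)]
              · rw [if_neg hx5, if_pos hx5]
            · rw [if_neg (by omega), if_neg hfr]
          · -- at least two distinct non-5 values
            rw [Classical.not_forall] at huni
            obtain ⟨g, hg⟩ := huni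
            rw [Classical.not_imp] at hg
            obtain ⟨hgF, hgf⟩ := hg
            have hno : ∀ i, ¬ (∀ y ∈ x :: xs, y = 5 ∨ y = i) := by
              intro i h
              have h1 : f = i := (h f hfrow).resolve_left hf5
              have h2 : g = i := (h g ((hFmem g).mp hgF).1).resolve_left ((hFmem g).mp hgF).2
              exact hgf (h2.trans h1.symm)
            rw [equ_loop_none x xs h5 hno]
            have hVlen : 1 < (PySem.Set.ofList F).length := by
              have hfV : f ∈ PySem.Set.ofList F := (PySem.Set.mem_ofList F f).mpr hfF
              have hgV : g ∈ PySem.Set.ofList F := (PySem.Set.mem_ofList F g).mpr hgF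
              by_contra hle
              rw [Nat.not_lt] at hle
              interval_cases h : (PySem.Set.ofList F).length
              · exact absurd hfV (by simp [List.length_eq_zero_iff.mp h])
              · obtain ⟨a, ha⟩ := List.length_eq_one_iff.mp h
                rw [ha] at hfV hgV
                simp at hfV hgV
                exact hgf (hgV.trans hfV.symm)
            have hVne : ¬ ((PySem.Set.ofList F).isEmpty = true) := by
              intro h
              rw [List.isEmpty_iff.mp h] at hVlen
              simp at hVlen
            rw [if_neg hVne, if_pos hVlen]
      · -- no wildcard: both test all-equal to row[0]
        rw [equ, equ_alt, if_neg hm1, if_neg hm1, if_pos h5, if_pos h5, hget]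
        have hcnt : PySem.List.count (x :: xs) x = List.count x (x :: xs) := by
          simp [PySem.List.count_eq]
        by_cases hall : ∀ y ∈ x :: xs, x = y
        · rw [if_pos (by rw [hcnt]; exact List.count_eq_length.mpr hall),
             if_pos (by simp only [List.all_eq_true]; intro y hy; exact beq_iff_eq.mpr (hall y hy).symm)]
        · rw [if_neg (by rw [hcnt]; exact fun h => hall (List.count_eq_length.mp h)),
             if_neg (by simp only [List.all_eq_true]; intro h; exact hall (fun y hy => (beq_iff_eq.mp (h y hy)).symm))]
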